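-- pv_equiv track=rewrite | github.com/brenandre23/FlashCLED | pipeline/modeling/pruning.py | apply_bundling_logic
-- ===== SOURCE A (Python) =====
-- from typing import List, Dict, Any, Tuple, Set, Optional
--
-- RESCUE_BUNDLES = {
--     'ntl_mean':           ['ntl_stale_days', 'ntl_trust_frac'],
--     'ntl_peak':           ['ntl_stale_days', 'ntl_trust_frac'],
--     'ntl_kinetic_delta':  ['ntl_stale_days', 'ntl_peak'],
--     'price_maize':        ['price_maize_recency_days', 'price_maize_shock'],
--     'price_rice':         ['price_rice_recency_days', 'price_rice_shock'],
--     'price_oil':          ['price_oil_recency_days', 'price_oil_shock'],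
--     'price_sorghum':      ['price_sorghum_recency_days', 'price_sorghum_shock'],
--     'price_cassava':      ['price_cassava_recency_days', 'price_cassava_shock'],
--     'price_groundnuts':   ['price_groundnuts_recency_days', 'price_groundnuts_shock'],
--     'food_price_index':   ['food_price_index_recency_days'],
--     'price_maize_shock':       ['price_maize'],
--     'price_rice_shock':        ['price_rice'],
--     'price_oil_shock':         ['price_oil'],
--     'price_sorghum_shock':     ['price_sorghum'],
--     'price_cassava_shock':     ['price_cassava'],
--     'price_groundnuts_shock':  ['price_groundnuts'],
--     'cw_score_local_spatial_lag':    ['cw_score_local'],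
--     'gdelt_event_count_spatial_lag': ['gdelt_event_count'],
--     'acled_fatalities_spatial_lag':  ['fatalities_14d_sum']
-- }
--
-- BIDIRECTIONAL_BUNDLES = {
--     'mech_gold_pivot':            ['mech_gold_pivot_uncertainty'],
--     'mech_predatory_tax':         ['mech_predatory_tax_uncertainty'],
--     'mech_factional_infighting':  ['mech_factional_infighting_uncertainty'],
--     'mech_collective_punishment': ['mech_collective_punishment_uncertainty']
-- }
--
-- FAMILY_GUARDS = {
--     'food_data_available':      [f'price_{c}' for c in ['maize', 'rice', 'oil', 'sorghum', 'cassava', 'groundnuts']] + ['food_price_index'],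
--     'iom_data_available':       ['iom_displacement_count_lag1'],
--     'viirs_data_available':     ['ntl_mean', 'ntl_peak', 'ntl_kinetic_delta'],
--     'gdelt_data_available':     ['gdelt_event_count', 'gdelt_predatory_action_decay_30d', 'gdelt_shock_signal'],
--     'econ_data_available':      ['gold_price_usd_lag1', 'oil_price_usd_lag1', 'eur_usd_rate_lag1', 'sp500_index_lag1'],
--     'landcover_data_available': ['landcover_grass', 'landcover_crops', 'landcover_trees', 'landcover_bare', 'landcover_built']
-- }
--
-- def apply_bundling_logic(stable_set: Set[str], available_cols: List[str]) -> List[str]: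
--     """Applies Rescue, Bidirectional, and Family logic to the stable feature set."""
--     final_features = set(stable_set)
--     available_set = set(available_cols)
--
--     # Bidirectional Bundles
--     for key, siblings in BIDIRECTIONAL_BUNDLES.items():
--         family = set([key] + siblings)
--         if family.intersection(final_features):
--             final_features.update([s for s in family if s in available_set])
--
--     # Rescue Bundles (iterate for chains)
--     changing = True
--     while changing:
--         start_len = len(final_features)
--         for feat in list(final_features):
--             if feat in RESCUE_BUNDLES:
--                 children = RESCUE_BUNDLES[feat]
--                 final_features.update([c for c in children if c in available_set])
--         changing = len(final_features) != start_len
--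
--     # Family Guards
--     for flag, family in FAMILY_GUARDS.items():
--         if flag in available_set and not final_features.isdisjoint(family):
--             final_features.add(flag)
--
--     return sorted(list(final_features))
-- ===== SOURCE B (Python) =====
-- from typing import List, Set
--
-- RESCUE_BUNDLES = {
--     'ntl_mean':           ['ntl_stale_days', 'ntl_trust_frac'],
--     'ntl_peak':           ['ntl_stale_days', 'ntl_trust_frac'],
--     'ntl_kinetic_delta':  ['ntl_stale_days', 'ntl_peak'],
--     'price_maize':        ['price_maize_recency_days', 'price_maize_shock'],
--     'price_rice':         ['price_rice_recency_days', 'price_rice_shock'],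
--     'price_oil':          ['price_oil_recency_days', 'price_oil_shock'],
--     'price_sorghum':      ['price_sorghum_recency_days', 'price_sorghum_shock'],
--     'price_cassava':      ['price_cassava_recency_days', 'price_cassava_shock'],
--     'price_groundnuts':   ['price_groundnuts_recency_days', 'price_groundnuts_shock'],
--     'food_price_index':   ['food_price_index_recency_days'],
--     'price_maize_shock':       ['price_maize'],
--     'price_rice_shock':        ['price_rice'],
--     'price_oil_shock':         ['price_oil'],
--     'price_sorghum_shock':     ['price_sorghum'],
--     'price_cassava_shock':     ['price_cassava'],
--     'price_groundnuts_shock':  ['price_groundnuts'],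
--     'cw_score_local_spatial_lag':    ['cw_score_local'],
--     'gdelt_event_count_spatial_lag': ['gdelt_event_count'],
--     'acled_fatalities_spatial_lag':  ['fatalities_14d_sum']
-- }
--
-- BIDIRECTIONAL_BUNDLES = {
--     'mech_gold_pivot':            ['mech_gold_pivot_uncertainty'],
--     'mech_predatory_tax':         ['mech_predatory_tax_uncertainty'],
--     'mech_factional_infighting':  ['mech_factional_infighting_uncertainty'],
--     'mech_collective_punishment': ['mech_collective_punishment_uncertainty']
-- }
--
-- FAMILY_GUARDS = {
--     'food_data_available':      [f'price_{c}' for c in ['maize', 'rice', 'oil', 'sorghum', 'cassava', 'groundnuts']] + ['food_price_index'],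
--     'iom_data_available':       ['iom_displacement_count_lag1'],
--     'viirs_data_available':     ['ntl_mean', 'ntl_peak', 'ntl_kinetic_delta'],
--     'gdelt_data_available':     ['gdelt_event_count', 'gdelt_predatory_action_decay_30d', 'gdelt_shock_signal'],
--     'econ_data_available':      ['gold_price_usd_lag1', 'oil_price_usd_lag1', 'eur_usd_rate_lag1', 'sp500_index_lag1'],
--     'landcover_data_available': ['landcover_grass', 'landcover_crops', 'landcover_trees', 'landcover_bare', 'landcover_built']
-- }
--
-- def apply_bundling_logic(stable_set: Set[str], available_cols: List[str]) -> List[str]: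
--     """Rescue / Bidirectional / Family bundling; rescue closure by a worklist instead of rescan passes."""
--     final_features = set(stable_set)
--     available_set = set(available_cols)
--
--     # Bidirectional Bundles
--     for key, siblings in BIDIRECTIONAL_BUNDLES.items():
--         family = set([key] + siblings)
--         if family.intersection(final_features):
--             final_features.update([s for s in family if s in available_set])
--
--     # Rescue Bundles: one-touch worklist closure (no full rescans)
--     queue = list(final_features)
--     while queue:
--         feat = queue.pop(0)
--         for c in RESCUE_BUNDLES.get(feat, []):
--             if c in available_set and c not in final_features:
--                 final_features.add(c)
--                 queue.append(c)
--
--     # Family Guards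
--     for flag, family in FAMILY_GUARDS.items():
--         if flag in available_set and not final_features.isdisjoint(family):
--             final_features.add(flag)
--
--     return sorted(list(final_features))
-- ===== Notes on version B (the rewrite author's own statement) =====
-- stated objective: alternative
-- what changed: The rescue-bundle closure is computed by a one-touch worklist (pop a feature, enqueue each newly added available child) instead of A's 'while changing' loop that rescans the whole feature set every pass; the bidirectional and family-guard passes are unchanged.
import Mathlib
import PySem

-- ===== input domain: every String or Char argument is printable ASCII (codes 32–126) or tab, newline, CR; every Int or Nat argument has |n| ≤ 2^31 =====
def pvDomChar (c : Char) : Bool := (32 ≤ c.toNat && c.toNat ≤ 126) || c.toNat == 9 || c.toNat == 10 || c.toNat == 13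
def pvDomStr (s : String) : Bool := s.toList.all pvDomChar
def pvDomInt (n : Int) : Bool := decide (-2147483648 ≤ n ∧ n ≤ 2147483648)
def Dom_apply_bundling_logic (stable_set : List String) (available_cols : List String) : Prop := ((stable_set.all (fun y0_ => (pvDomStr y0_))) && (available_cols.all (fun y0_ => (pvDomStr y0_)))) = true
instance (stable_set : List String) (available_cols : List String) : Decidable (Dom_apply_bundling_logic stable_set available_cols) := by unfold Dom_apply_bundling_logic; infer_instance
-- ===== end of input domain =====

-- B replaces A's repeated full-rescan fixpoint loop over the rescue bundles by a one-touch
-- worklist closure; same return value, objective: alternative (no measured speed claim).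

-- module constants (shared data of both Pythons)
def RESCUE_BUNDLES : PySem.Dict String (List String) := PySem.Dict.ofList [
  ("ntl_mean",           ["ntl_stale_days", "ntl_trust_frac"]),
  ("ntl_peak",           ["ntl_stale_days", "ntl_trust_frac"]),
  ("ntl_kinetic_delta",  ["ntl_stale_days", "ntl_peak"]),
  ("price_maize",        ["price_maize_recency_days", "price_maize_shock"]),
  ("price_rice",         ["price_rice_recency_days", "price_rice_shock"]),
  ("price_oil",          ["price_oil_recency_days", "price_oil_shock"]),
  ("price_sorghum",      ["price_sorghum_recency_days", "price_sorghum_shock"]),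
  ("price_cassava",      ["price_cassava_recency_days", "price_cassava_shock"]),
  ("price_groundnuts",   ["price_groundnuts_recency_days", "price_groundnuts_shock"]),
  ("food_price_index",   ["food_price_index_recency_days"]),
  ("price_maize_shock",      ["price_maize"]),
  ("price_rice_shock",       ["price_rice"]),
  ("price_oil_shock",        ["price_oil"]),
  ("price_sorghum_shock",    ["price_sorghum"]),
  ("price_cassava_shock",    ["price_cassava"]),
  ("price_groundnuts_shock", ["price_groundnuts"]),
  ("cw_score_local_spatial_lag",    ["cw_score_local"]),
  ("gdelt_event_count_spatial_lag", ["gdelt_event_count"]),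
  ("acled_fatalities_spatial_lag",  ["fatalities_14d_sum"])]

def BIDIRECTIONAL_BUNDLES : PySem.Dict String (List String) := PySem.Dict.ofList [
  ("mech_gold_pivot",            ["mech_gold_pivot_uncertainty"]),
  ("mech_predatory_tax",         ["mech_predatory_tax_uncertainty"]),
  ("mech_factional_infighting",  ["mech_factional_infighting_uncertainty"]),
  ("mech_collective_punishment", ["mech_collective_punishment_uncertainty"])]

def FAMILY_GUARDS : PySem.Dict String (List String) := PySem.Dict.ofList [
  ("food_data_available",      ["price_maize", "price_rice", "price_oil", "price_sorghum", "price_cassava", "price_groundnuts", "food_price_index"]),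
  ("iom_data_available",       ["iom_displacement_count_lag1"]),
  ("viirs_data_available",     ["ntl_mean", "ntl_peak", "ntl_kinetic_delta"]),
  ("gdelt_data_available",     ["gdelt_event_count", "gdelt_predatory_action_decay_30d", "gdelt_shock_signal"]),
  ("econ_data_available",      ["gold_price_usd_lag1", "oil_price_usd_lag1", "eur_usd_rate_lag1", "sp500_index_lag1"]),
  ("landcover_data_available", ["landcover_grass", "landcover_crops", "landcover_trees", "landcover_bare", "landcover_built"])]

-- ===== PORT A =====
-- 'for key, siblings in BIDIRECTIONAL_BUNDLES.items(): …' loop body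
def bidirStepA (avail F : PySem.Set String) (kv : String × List String) : PySem.Set String :=
  if PySem.Set.inter (PySem.Set.ofList (kv.1 :: kv.2)) F ≠ [] then
    PySem.Set.update F ((PySem.Set.ofList (kv.1 :: kv.2)).filter (fun s => PySem.Set.contains avail s))
  else F

def bidirPassA (avail F : PySem.Set String) : PySem.Set String :=
  BIDIRECTIONAL_BUNDLES.items.foldl (bidirStepA avail) F

-- 'for feat in list(final_features): …' loop body of the rescue pass
def rescueStepA (avail F : PySem.Set String) (feat : String) : PySem.Set String :=
  if RESCUE_BUNDLES.contains feat then
    PySem.Set.update F ((RESCUE_BUNDLES.getD feat []).filter (fun c => PySem.Set.contains avail c))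
  else F

-- one body of the 'while changing' loop: fold over the snapshot list(final_features)
def rescuePassA (avail S : PySem.Set String) : PySem.Set String :=
  S.foldl (rescueStepA avail) S

-- termination facts for the 'while changing' loop (cited in decreasing_by)
theorem pv_foldl_rescueStepA_append (avail : PySem.Set String) :
    ∀ (l : List String) (F : PySem.Set String), ∃ e, l.foldl (rescueStepA avail) F = F ++ e ∧
      ∀ x ∈ e, x ∈ avail ∧ x ∉ F := by
  intro l
  induction l with
  | nil => exact fun F => ⟨[], by simp⟩
  | cons a l ih =>
    intro F
    have hstep : ∃ e₁, rescueStepA avail F a = F ++ e₁ ∧ ∀ x ∈ e₁, x ∈ avail ∧ x ∉ F := by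
      unfold rescueStepA
      split
      · refine ⟨_, PySem.Set.update_eq_append_filter F _, ?_⟩
        intro x hx
        simp only [List.mem_filter, PySem.Set.mem_ofList, Bool.not_eq_true'] at hx
        obtain ⟨⟨-, hav⟩, hnc⟩ := hx
        exact ⟨(PySem.Set.contains_iff avail x).mp hav,
          by simpa [PySem.Set.contains_eq_listContains, List.contains_eq_mem] using hnc⟩
      · exact ⟨[], by simp⟩
    obtain ⟨e₁, h1, h2⟩ := hstep
    obtain ⟨e₂, h3, h4⟩ := ih (F ++ e₁)
    refine ⟨e₁ ++ e₂, ?_, ?_⟩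
    · simp only [List.foldl_cons, h1, h3, List.append_assoc]
    · intro x hx
      rcases List.mem_append.mp hx with hx1 | hx2
      · exact h2 x hx1
      · obtain ⟨ha, hb⟩ := h4 x hx2
        exact ⟨ha, fun hxF => hb (List.mem_append.mpr (Or.inl hxF))⟩

theorem pv_rescuePassA_append (avail S : PySem.Set String) :
    ∃ e, rescuePassA avail S = S ++ e ∧ ∀ x ∈ e, x ∈ avail ∧ x ∉ S :=
  pv_foldl_rescueStepA_append avail S S

theorem pv_diff_length_lt (avail S e : List String) (x : String)
    (hx : x ∈ e) (hxa : x ∈ avail) (hxS : x ∉ S) :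
    (PySem.Set.diff avail (S ++ e)).length < (PySem.Set.diff avail S).length := by
  have hsub : (PySem.Set.diff avail (S ++ e)).Sublist (PySem.Set.diff avail S) := by
    unfold PySem.Set.diff
    apply List.monotone_filter_right
    intro a ha
    simp only [Bool.not_eq_true', PySem.Set.contains] at ha ⊢
    simp only [List.contains_eq_mem, decide_eq_false_iff_not, List.mem_append] at ha ⊢
    exact fun h => ha (Or.inl h)
  rcases eq_or_lt_of_le hsub.length_le with heq | hlt
  · exfalso
    have hEq := hsub.eq_of_length heq
    have hx1 : x ∈ PySem.Set.diff avail S := (PySem.Set.mem_diff _ _ _).mpr ⟨hxa, hxS⟩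
    rw [← hEq] at hx1
    exact ((PySem.Set.mem_diff _ _ _).mp hx1).2 (List.mem_append.mpr (Or.inr hx))
  · exact hlt

-- 'changing = True; while changing: …' — repeat the pass until the length stops changing
def rescueLoopA (avail S : PySem.Set String) : PySem.Set String :=
  if PySem.Set.len (rescuePassA avail S) ≠ PySem.Set.len S then
    rescueLoopA avail (rescuePassA avail S)
  else rescuePassA avail S
termination_by (PySem.Set.diff avail S).length
decreasing_by
  rename_i h
  obtain ⟨e, he, hprop⟩ := pv_rescuePassA_append avail S
  have hne : e ≠ [] := by
    intro hnil
    apply h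
    rw [he, hnil, List.append_nil]
  obtain ⟨x, hx⟩ := List.exists_mem_of_ne_nil e hne
  rw [he]
  exact pv_diff_length_lt avail S e x hx (hprop x hx).1 (hprop x hx).2

-- 'for flag, family in FAMILY_GUARDS.items(): …' loop body
def famStepA (avail F : PySem.Set String) (kv : String × List String) : PySem.Set String :=
  if PySem.Set.contains avail kv.1 && !(PySem.Set.isdisjoint F kv.2) then
    PySem.Set.add F kv.1
  else F

def famPassA (avail F : PySem.Set String) : PySem.Set String :=
  FAMILY_GUARDS.items.foldl (famStepA avail) F

def apply_bundling_logic (stable_set : List String) (available_cols : List String) : List String :=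
  let final0 := PySem.Set.ofList stable_set
  let avail := PySem.Set.ofList available_cols
  let final1 := bidirPassA avail final0
  let final2 := rescueLoopA avail final1
  let final3 := famPassA avail final2
  PySem.List.sorted final3 (fun x => x) false

-- ===== PORT B =====
-- bidirectional pass, kept exactly as in A's Python
def bidirStepB (avail G : PySem.Set String) (kv : String × List String) : PySem.Set String :=
  if PySem.Set.inter (PySem.Set.ofList (kv.1 :: kv.2)) G ≠ [] then
    PySem.Set.update G ((PySem.Set.ofList (kv.1 :: kv.2)).filter (fun s => PySem.Set.contains avail s))
  else G

def bidirPassB (avail G : PySem.Set String) : PySem.Set String :=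
  BIDIRECTIONAL_BUNDLES.items.foldl (bidirStepB avail) G

-- inner 'for c in RESCUE_BUNDLES.get(feat, []): …' body: maybe add c to the set and enqueue it
def wlStepB (avail : PySem.Set String) (p : PySem.Set String × List String) (c : String) :
    PySem.Set String × List String :=
  if PySem.Set.contains avail c && !(PySem.Set.contains p.1 c) then
    (PySem.Set.add p.1 c, p.2 ++ [c])
  else p

def processChildren (avail : PySem.Set String) (F : PySem.Set String) (Q : List String)
    (cs : List String) : PySem.Set String × List String :=
  cs.foldl (wlStepB avail) (F, Q)

-- termination facts for the worklist loop (cited in decreasing_by)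
theorem pv_processChildren_cons (avail : PySem.Set String) (F : PySem.Set String)
    (Q : List String) (c : String) (cs : List String) :
    processChildren avail F Q (c :: cs) =
      processChildren avail (wlStepB avail (F, Q) c).1 (wlStepB avail (F, Q) c).2 cs := rfl

theorem pv_wl_cond (avail F : PySem.Set String) (c : String)
    (hc : (PySem.Set.contains avail c && !(PySem.Set.contains F c)) = true) :
    c ∈ avail ∧ c ∉ F := by
  simp only [Bool.and_eq_true, Bool.not_eq_true', PySem.Set.contains_eq_listContains,
    List.contains_eq_mem, decide_eq_true_eq, decide_eq_false_iff_not] at hc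
  exact hc

theorem pv_diff_add_lt (avail F : PySem.Set String) (c : String)
    (hca : c ∈ avail) (hcF : c ∉ F) :
    (PySem.Set.diff avail (PySem.Set.add F c)).length < (PySem.Set.diff avail F).length := by
  rw [PySem.Set.add_of_not_mem hcF]
  exact pv_diff_length_lt avail F [c] c (by simp) hca hcF

theorem pv_process_measure (avail : PySem.Set String) :
    ∀ (cs : List String) (F : PySem.Set String) (Q : List String),
      2 * (PySem.Set.diff avail (processChildren avail F Q cs).1).length
        + (processChildren avail F Q cs).2.length
      ≤ 2 * (PySem.Set.diff avail F).length + Q.length := by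
  intro cs
  induction cs with
  | nil => intro F Q; simp [processChildren]
  | cons c cs ih =>
    intro F Q
    rw [pv_processChildren_cons]
    by_cases hc : (PySem.Set.contains avail c && !(PySem.Set.contains F c)) = true
    · have hstep : wlStepB avail (F, Q) c = (PySem.Set.add F c, Q ++ [c]) := by
        unfold wlStepB; rw [if_pos hc]
      rw [hstep]
      refine le_trans (ih (PySem.Set.add F c) (Q ++ [c])) ?_
      obtain ⟨hca, hcF⟩ := pv_wl_cond avail F c hc
      have := pv_diff_add_lt avail F c hca hcF
      simp only [List.length_append, List.length_cons, List.length_nil]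
      omega
    · have hstep : wlStepB avail (F, Q) c = (F, Q) := by
        unfold wlStepB; rw [if_neg hc]
      rw [hstep]
      exact ih F Q

-- 'queue = list(final_features); while queue: feat = queue.pop(0); …'
def worklistB (avail : PySem.Set String) (F : PySem.Set String) (Q : List String) :
    PySem.Set String :=
  match Q with
  | [] => F
  | feat :: rest =>
    worklistB avail (processChildren avail F rest (RESCUE_BUNDLES.getD feat [])).1
      (processChildren avail F rest (RESCUE_BUNDLES.getD feat [])).2
termination_by 2 * (PySem.Set.diff avail F).length + Q.length
decreasing_by
  have := pv_process_measure avail (RESCUE_BUNDLES.getD feat []) F rest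
  simp only [List.length_cons]
  omega

-- family-guard pass, kept exactly as in A's Python
def famStepB (avail G : PySem.Set String) (kv : String × List String) : PySem.Set String :=
  if PySem.Set.contains avail kv.1 && !(PySem.Set.isdisjoint G kv.2) then
    PySem.Set.add G kv.1
  else G

def famPassB (avail G : PySem.Set String) : PySem.Set String :=
  FAMILY_GUARDS.items.foldl (famStepB avail) G

def apply_bundling_logic_alt (stable_set : List String) (available_cols : List String) : List String :=
  let final := PySem.Set.ofList stable_set
  let availB := PySem.Set.ofList available_cols
  let afterBidir := bidirPassB availB final
  let closed := worklistB availB afterBidir afterBidir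
  let guarded := famPassB availB closed
  PySem.List.sorted guarded (fun x => x) false

-- ===== PRECONDITION & SPEC =====
def Spec_apply_bundling_logic (stable_set : List String) (available_cols : List String) (out : List String) : Prop := out = apply_bundling_logic_alt stable_set available_cols
instance (stable_set : List String) (available_cols : List String) (out : List String) : Decidable (Spec_apply_bundling_logic stable_set available_cols out) := by unfold Spec_apply_bundling_logic; infer_instance

-- ===== CLAIM (what is proved, stated in full; the proofs are below) =====
def Claim_equal_apply_bundling_logic : Prop := ∀ (stable_set : List String) (available_cols : List String), Dom_apply_bundling_logic stable_set available_cols → Spec_apply_bundling_logic stable_set available_cols (apply_bundling_logic stable_set available_cols)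

-- ===== LEMMAS AND PROOFS =====

theorem pv_wl_cond_neg (avail F : PySem.Set String) (c : String)
    (hc : ¬((PySem.Set.contains avail c && !(PySem.Set.contains F c)) = true))
    (hca : c ∈ avail) : c ∈ F := by
  simp only [Bool.and_eq_true, Bool.not_eq_true', PySem.Set.contains_eq_listContains,
    List.contains_eq_mem, decide_eq_true_eq, decide_eq_false_iff_not, not_and, not_not] at hc
  exact hc hca


-- a set T is closed under the rescue rule (children available to it are in it)
def pvRClosed (avail T : List String) : Prop :=
  ∀ f ∈ T, ∀ c ∈ RESCUE_BUNDLES.getD f [], c ∈ avail → c ∈ T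

-- ---- A's fixpoint loop computes the least rescue-closed superset ----

theorem pv_foldl_rescueStepA_children (avail : PySem.Set String) :
    ∀ (l : List String) (F : PySem.Set String) (f : String), f ∈ l →
      ∀ c ∈ RESCUE_BUNDLES.getD f [], c ∈ avail → c ∈ l.foldl (rescueStepA avail) F := by
  intro l
  induction l with
  | nil => intro F f hf; cases hf
  | cons a l ih =>
    intro F f hf c hc hca
    simp only [List.foldl_cons]
    have hmono : ∀ (G : PySem.Set String) (x : String), x ∈ G → x ∈ l.foldl (rescueStepA avail) G := by
      intro G x hx
      obtain ⟨e, he, -⟩ := pv_foldl_rescueStepA_append avail l G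
      rw [he]; exact List.mem_append.mpr (Or.inl hx)
    rcases List.mem_cons.mp hf with hf | hf
    · -- f is the head: its children are pulled in by this very step
      subst hf
      apply hmono
      unfold rescueStepA
      split
      · rw [PySem.Set.update_eq_append_filter]
        by_cases hcF : c ∈ F
        · exact List.mem_append.mpr (Or.inl hcF)
        · apply List.mem_append.mpr
          right
          simp only [List.mem_filter, PySem.Set.mem_ofList, Bool.not_eq_true']
          refine ⟨⟨hc, (PySem.Set.contains_iff avail c).mpr hca⟩, ?_⟩
          cases h : PySem.Set.contains F c
          · rfl
          · exact absurd ((PySem.Set.contains_iff F c).mp h) hcF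
      · rename_i hnc
        rw [PySem.Dict.getD_of_not_contains _ _
          (by revert hnc; cases RESCUE_BUNDLES.contains f <;> simp)] at hc
        cases hc
    · exact ih (rescueStepA avail F a) f hf c hc hca

theorem pv_foldl_rescueStepA_subset (avail : PySem.Set String) (T : List String)
    (hT : pvRClosed avail T) :
    ∀ (l : List String) (F : PySem.Set String), (∀ f ∈ l, f ∈ T) → (∀ x ∈ F, x ∈ T) →
      ∀ x ∈ l.foldl (rescueStepA avail) F, x ∈ T := by
  intro l
  induction l with
  | nil => intro F _ hF x hx; exact hF x hx
  | cons a l ih =>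
    intro F hl hF x hx
    refine ih _ (fun f hf => hl f (List.mem_cons_of_mem a hf)) ?_ x hx
    intro y hy
    unfold rescueStepA at hy
    split at hy
    · rw [PySem.Set.update_eq_append_filter] at hy
      rcases List.mem_append.mp hy with hy | hy
      · exact hF y hy
      · simp only [List.mem_filter, PySem.Set.mem_ofList] at hy
        obtain ⟨⟨hyc, hyav⟩, -⟩ := hy
        exact hT a (hl a List.mem_cons_self) y hyc ((PySem.Set.contains_iff avail y).mp hyav)
    · exact hF y hy

theorem pv_foldl_rescueStepA_nodup (avail : PySem.Set String) :
    ∀ (l : List String) (F : PySem.Set String), F.Nodup → (l.foldl (rescueStepA avail) F).Nodup := by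
  intro l
  induction l with
  | nil => intro F hF; exact hF
  | cons a l ih =>
    intro F hF
    refine ih _ ?_
    unfold rescueStepA
    split
    · exact PySem.Set.nodup_update _ _ hF
    · exact hF

theorem pv_rescueLoopA_superset (avail S : PySem.Set String) :
    ∀ x ∈ S, x ∈ rescueLoopA avail S := by
  induction S using rescueLoopA.induct avail with
  | case1 S hch ih =>
    intro x hx
    rw [rescueLoopA, if_pos hch]
    apply ih
    obtain ⟨e, he, -⟩ := pv_rescuePassA_append avail S
    rw [he]; exact List.mem_append.mpr (Or.inl hx)
  | case2 S hch =>
    intro x hx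
    rw [rescueLoopA, if_neg hch]
    obtain ⟨e, he, -⟩ := pv_rescuePassA_append avail S
    rw [rescuePassA] at he ⊢
    rw [he]; exact List.mem_append.mpr (Or.inl hx)

theorem pv_rescueLoopA_closed (avail S : PySem.Set String) :
    pvRClosed avail (rescueLoopA avail S) := by
  induction S using rescueLoopA.induct avail with
  | case1 S hch ih =>
    rw [rescueLoopA, if_pos hch]; exact ih
  | case2 S hch =>
    rw [rescueLoopA, if_neg hch]
    -- the pass changed nothing: rescuePassA avail S = S
    obtain ⟨e, he, -⟩ := pv_rescuePassA_append avail S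
    have hlen : (rescuePassA avail S).length = S.length := by
      simp only [ne_eq, not_not, PySem.Set.len] at hch
      exact_mod_cast hch
    have he0 : e = [] := by
      have := congrArg List.length he
      simp only [List.length_append, hlen] at this
      exact List.length_eq_zero_iff.mp (by omega)
    have hfix : rescuePassA avail S = S := by rw [he, he0, List.append_nil]
    intro f hf c hc hca
    rw [hfix] at hf ⊢
    have := pv_foldl_rescueStepA_children avail S S f hf c hc hca
    rw [← rescuePassA, hfix] at this
    exact this

theorem pv_rescueLoopA_min (avail : PySem.Set String) (T : List String)
    (hT : pvRClosed avail T) :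
    ∀ (S : PySem.Set String), (∀ x ∈ S, x ∈ T) → ∀ x ∈ rescueLoopA avail S, x ∈ T := by
  intro S
  induction S using rescueLoopA.induct avail with
  | case1 S hch ih =>
    intro hS x hx
    rw [rescueLoopA, if_pos hch] at hx
    exact ih (pv_foldl_rescueStepA_subset avail T hT S S hS hS) x hx
  | case2 S hch =>
    intro hS x hx
    rw [rescueLoopA, if_neg hch] at hx
    exact pv_foldl_rescueStepA_subset avail T hT S S hS hS x hx

theorem pv_rescueLoopA_nodup (avail S : PySem.Set String) (hS : S.Nodup) :
    (rescueLoopA avail S).Nodup := by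
  induction S using rescueLoopA.induct avail with
  | case1 S hch ih =>
    rw [rescueLoopA, if_pos hch]
    exact ih (pv_foldl_rescueStepA_nodup avail S S hS)
  | case2 S hch =>
    rw [rescueLoopA, if_neg hch]
    exact pv_foldl_rescueStepA_nodup avail S S hS

-- ---- B's worklist computes the same least rescue-closed superset ----

theorem pv_process_append (avail : PySem.Set String) :
    ∀ (cs : List String) (F : PySem.Set String) (Q : List String),
      ∃ n, (processChildren avail F Q cs).1 = F ++ n ∧ (processChildren avail F Q cs).2 = Q ++ n ∧
        ∀ x ∈ n, x ∈ avail ∧ x ∉ F ∧ x ∈ cs := by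
  intro cs
  induction cs with
  | nil => intro F Q; exact ⟨[], by simp [processChildren]⟩
  | cons c cs ih =>
    intro F Q
    rw [pv_processChildren_cons]
    by_cases hc : (PySem.Set.contains avail c && !(PySem.Set.contains F c)) = true
    · obtain ⟨hca, hcF⟩ := pv_wl_cond avail F c hc
      have hstep : wlStepB avail (F, Q) c = (F ++ [c], Q ++ [c]) := by
        unfold wlStepB; rw [if_pos hc, PySem.Set.add_of_not_mem hcF]
      rw [hstep]
      obtain ⟨n, h1, h2, h3⟩ := ih (F ++ [c]) (Q ++ [c])
      refine ⟨c :: n, ?_, ?_, ?_⟩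
      · rw [h1]; simp
      · rw [h2]; simp
      · intro x hx
        rcases List.mem_cons.mp hx with hx | hx
        · subst hx; exact ⟨hca, hcF, List.mem_cons_self⟩
        · obtain ⟨ha, hb, hcs⟩ := h3 x hx
          exact ⟨ha, fun hxF => hb (List.mem_append.mpr (Or.inl hxF)),
            List.mem_cons_of_mem c hcs⟩
    · have hstep : wlStepB avail (F, Q) c = (F, Q) := by
        unfold wlStepB; rw [if_neg hc]
      rw [hstep]
      obtain ⟨n, h1, h2, h3⟩ := ih F Q
      exact ⟨n, h1, h2, fun x hx =>
        ⟨(h3 x hx).1, (h3 x hx).2.1, List.mem_cons_of_mem c (h3 x hx).2.2⟩⟩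

theorem pv_process_children_mem (avail : PySem.Set String) :
    ∀ (cs : List String) (F : PySem.Set String) (Q : List String) (c : String),
      c ∈ cs → c ∈ avail → c ∈ (processChildren avail F Q cs).1 := by
  intro cs
  induction cs with
  | nil => intro F Q c hc; cases hc
  | cons a cs ih =>
    intro F Q c hc hca
    rw [pv_processChildren_cons]
    rcases List.mem_cons.mp hc with hc | hc
    · -- c = a : after this step c is in the set, and membership persists
      subst hc
      have hmem : c ∈ (wlStepB avail (F, Q) c).1 := by
        unfold wlStepB
        split
        · exact (PySem.Set.mem_add _ _ _).mpr (Or.inr rfl)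
        · rename_i hcond
          exact pv_wl_cond_neg avail F c hcond hca
      obtain ⟨n, h1, -, -⟩ := pv_process_append avail cs (wlStepB avail (F, Q) c).1
        (wlStepB avail (F, Q) c).2
      rw [h1]
      exact List.mem_append.mpr (Or.inl hmem)
    · exact ih _ _ c hc hca

theorem pv_process_subset (avail : PySem.Set String) (T : List String)
    (cs : List String) (F : PySem.Set String) (Q : List String)
    (hF : ∀ x ∈ F, x ∈ T) (hc : ∀ c ∈ cs, c ∈ avail → c ∈ T) :
    ∀ x ∈ (processChildren avail F Q cs).1, x ∈ T := by
  intro x hx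
  obtain ⟨n, h1, -, h3⟩ := pv_process_append avail cs F Q
  rw [h1] at hx
  rcases List.mem_append.mp hx with hx | hx
  · exact hF x hx
  · obtain ⟨ha, -, hcs⟩ := h3 x hx
    exact hc x hcs ha

theorem pv_process_nodup (avail : PySem.Set String) :
    ∀ (cs : List String) (F : PySem.Set String) (Q : List String), F.Nodup →
      (processChildren avail F Q cs).1.Nodup := by
  intro cs
  induction cs with
  | nil => intro F Q hF; exact hF
  | cons c cs ih =>
    intro F Q hF
    rw [pv_processChildren_cons]
    apply ih
    unfold wlStepB
    split
    · exact PySem.Set.nodup_add _ _ hF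
    · exact hF

theorem pv_worklistB_superset (avail : PySem.Set String) :
    ∀ (F : PySem.Set String) (Q : List String), ∀ x ∈ F, x ∈ worklistB avail F Q := by
  intro F Q
  induction F, Q using worklistB.induct avail with
  | case1 F => intro x hx; rw [worklistB]; exact hx
  | case2 F feat rest ih =>
    intro x hx
    rw [worklistB]
    apply ih
    obtain ⟨n, h1, -, -⟩ := pv_process_append avail (RESCUE_BUNDLES.getD feat []) F rest
    rw [h1]
    exact List.mem_append.mpr (Or.inl hx)

theorem pv_worklistB_closed (avail : PySem.Set String) :
    ∀ (F : PySem.Set String) (Q : List String),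
      (∀ f ∈ F, f ∈ Q ∨ ∀ c ∈ RESCUE_BUNDLES.getD f [], c ∈ avail → c ∈ F) →
      pvRClosed avail (worklistB avail F Q) := by
  intro F Q
  induction F, Q using worklistB.induct avail with
  | case1 F =>
    intro hInv f hf c hc hca
    rw [worklistB] at hf ⊢
    rcases hInv f hf with h | h
    · cases h
    · exact h c hc hca
  | case2 F feat rest ih =>
    intro hInv
    rw [worklistB]
    apply ih
    -- re-establish the invariant for the popped state
    obtain ⟨n, h1, h2, h3⟩ := pv_process_append avail (RESCUE_BUNDLES.getD feat []) F rest
    intro f hf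
    rw [h1] at hf
    rcases List.mem_append.mp hf with hfF | hfn
    · rcases hInv f hfF with hq | hcl
      · rcases List.mem_cons.mp hq with hq | hq
        · -- f = feat : all its available children are now in the set
          subst hq
          right
          intro c hc hca
          exact pv_process_children_mem avail _ F rest c hc hca
        · left; rw [h2]; exact List.mem_append.mpr (Or.inl hq)
      · right
        intro c hc hca
        rw [h1]
        exact List.mem_append.mpr (Or.inl (hcl c hc hca))
    · left; rw [h2]; exact List.mem_append.mpr (Or.inr hfn)

theorem pv_worklistB_min (avail : PySem.Set String) (T : List String)
    (hT : pvRClosed avail T) :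
    ∀ (F : PySem.Set String) (Q : List String), (∀ x ∈ F, x ∈ T) → (∀ q ∈ Q, q ∈ F) →
      ∀ x ∈ worklistB avail F Q, x ∈ T := by
  intro F Q
  induction F, Q using worklistB.induct avail with
  | case1 F =>
    intro hF _ x hx
    rw [worklistB] at hx
    exact hF x hx
  | case2 F feat rest ih =>
    intro hF hQ x hx
    rw [worklistB] at hx
    have hfeatT : feat ∈ T := hF feat (hQ feat List.mem_cons_self)
    obtain ⟨n, h1, h2, h3⟩ := pv_process_append avail (RESCUE_BUNDLES.getD feat []) F rest
    refine ih ?_ ?_ x hx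
    · exact pv_process_subset avail T _ F rest hF (fun c hc hca => hT feat hfeatT c hc hca)
    · intro q hq
      rw [h2] at hq
      rw [h1]
      rcases List.mem_append.mp hq with hq | hq
      · exact List.mem_append.mpr (Or.inl (hQ q (List.mem_cons_of_mem feat hq)))
      · exact List.mem_append.mpr (Or.inr hq)

theorem pv_worklistB_nodup (avail : PySem.Set String) :
    ∀ (F : PySem.Set String) (Q : List String), F.Nodup → (worklistB avail F Q).Nodup := by
  intro F Q
  induction F, Q using worklistB.induct avail with
  | case1 F => intro hF; rw [worklistB]; exact hF
  | case2 F feat rest ih =>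
    intro hF
    rw [worklistB]
    exact ih (pv_process_nodup avail _ F rest hF)

-- ---- the two rescue closures have the same members ----

theorem pv_rescue_equiv (avail S : PySem.Set String) :
    ∀ x, x ∈ rescueLoopA avail S ↔ x ∈ worklistB avail S S := by
  intro x
  constructor
  · intro hx
    refine pv_rescueLoopA_min avail (worklistB avail S S)
      (pv_worklistB_closed avail S S (fun f hf => Or.inl hf)) S
      (pv_worklistB_superset avail S S) x hx
  · intro hx
    refine pv_worklistB_min avail (rescueLoopA avail S)
      (pv_rescueLoopA_closed avail S) S S
      (pv_rescueLoopA_superset avail S) (fun q hq => hq) x hx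

-- ---- the shared passes ----

theorem pv_bidirB_eq_A (avail F : PySem.Set String) : bidirPassB avail F = bidirPassA avail F := rfl

theorem pv_famB_eq_A (avail F : PySem.Set String) : famPassB avail F = famPassA avail F := rfl

theorem pv_bidir_nodup (avail : PySem.Set String) (F : PySem.Set String) (hF : F.Nodup) :
    (bidirPassA avail F).Nodup := by
  unfold bidirPassA
  generalize BIDIRECTIONAL_BUNDLES.items = l
  induction l generalizing F with
  | nil => exact hF
  | cons kv l ih =>
    refine ih _ ?_
    unfold bidirStepA
    split
    · exact PySem.Set.nodup_update _ _ hF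
    · exact hF

theorem pv_fam_mem (avail : PySem.Set String) :
    ∀ (l : List (String × List String)) (F G : PySem.Set String), (∀ x, x ∈ F ↔ x ∈ G) →
      ∀ x, x ∈ l.foldl (famStepA avail) F ↔ x ∈ l.foldl (famStepA avail) G := by
  intro l
  induction l with
  | nil => intro F G h x; exact h x
  | cons kv l ih =>
    intro F G h x
    simp only [List.foldl_cons]
    refine ih _ _ ?_ x
    intro y
    have hd : PySem.Set.isdisjoint F kv.2 = PySem.Set.isdisjoint G kv.2 := by
      rw [Bool.eq_iff_iff, PySem.Set.isdisjoint_iff, PySem.Set.isdisjoint_iff]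
      constructor
      · intro hh z hz; exact hh z ((h z).mpr hz)
      · intro hh z hz; exact hh z ((h z).mp hz)
    unfold famStepA
    rw [hd]
    split
    · rw [PySem.Set.mem_add, PySem.Set.mem_add, h y]
    · exact h y

theorem pv_fam_nodup (avail : PySem.Set String) :
    ∀ (l : List (String × List String)) (F : PySem.Set String), F.Nodup →
      (l.foldl (famStepA avail) F).Nodup := by
  intro l
  induction l with
  | nil => intro F hF; exact hF
  | cons kv l ih =>
    intro F hF
    simp only [List.foldl_cons]
    refine ih _ ?_
    unfold famStepA
    split
    · exact PySem.Set.nodup_add _ _ hF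
    · exact hF

-- ===== VERDICT (by name: the statement is the Claim_ definition above) =====
theorem apply_bundling_logic_spec : Claim_equal_apply_bundling_logic := by
  intro ss ac _
  unfold Spec_apply_bundling_logic
  show apply_bundling_logic ss ac = apply_bundling_logic_alt ss ac
  simp only [apply_bundling_logic, apply_bundling_logic_alt, pv_bidirB_eq_A, pv_famB_eq_A]
  set avail := PySem.Set.ofList ac with havail
  set S := bidirPassA avail (PySem.Set.ofList ss) with hS
  have hSn : S.Nodup := pv_bidir_nodup avail _ (PySem.Set.nodup_ofList ss)
  have hA : (famPassA avail (rescueLoopA avail S)).Nodup :=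
    pv_fam_nodup avail _ _ (pv_rescueLoopA_nodup avail S hSn)
  have hB : (famPassA avail (worklistB avail S S)).Nodup :=
    pv_fam_nodup avail _ _ (pv_worklistB_nodup avail S S hSn)
  have hmem : ∀ x, x ∈ famPassA avail (rescueLoopA avail S) ↔
      x ∈ famPassA avail (worklistB avail S S) :=
    pv_fam_mem avail _ _ _ (pv_rescue_equiv avail S)
  exact PySem.List.sorted_eq_sorted_of_perm _ _ (fun x => x) (fun a b h => h)
    ((List.perm_ext_iff_of_nodup hA hB).mpr hmem)
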